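-- pv_equiv track=rewrite | github.com/maximilianoangel/Lab_Criptografia | hash.py | rellenar
-- ===== SOURCE A (Python) =====
-- def rellenar(palabra,pos):
--     #cEsta funcion rellena una palabra menor a 32 caracteres con los caracteres contenidos en salt, se termina al tener 32 caracteres.
--     salt=["A","b","C","d","E"]
--     if pos == len(salt):
--         pos=0
--     if len(palabra) <32:
--         pal=palabra+salt[pos]
--         pos=pos+1
--         pal=rellenar(pal,pos)
--         return pal
--     else:
--         return palabra
-- ===== SOURCE B (Python) =====
-- def rellenar(palabra, pos):
--     # Closed form: append the needed number of salt characters directly,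
--     # cycling with modular arithmetic instead of one recursive call per character.
--     salt = "AbCdE"
--     n = 32 - len(palabra)
--     if n <= 0:
--         return palabra
--     return palabra + "".join(salt[(pos + k) % 5] for k in range(n))
-- ===== Notes on version B (the rewrite author's own statement) =====
-- stated objective: simpler
-- what changed: Replaces A's one-character-per-call recursion with a single closed-form pad: compute n = 32 - len(palabra) and append salt[(pos+k) % 5] for k in range(n), using modular arithmetic instead of the check-reset-increment cursor.
import Mathlib
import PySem

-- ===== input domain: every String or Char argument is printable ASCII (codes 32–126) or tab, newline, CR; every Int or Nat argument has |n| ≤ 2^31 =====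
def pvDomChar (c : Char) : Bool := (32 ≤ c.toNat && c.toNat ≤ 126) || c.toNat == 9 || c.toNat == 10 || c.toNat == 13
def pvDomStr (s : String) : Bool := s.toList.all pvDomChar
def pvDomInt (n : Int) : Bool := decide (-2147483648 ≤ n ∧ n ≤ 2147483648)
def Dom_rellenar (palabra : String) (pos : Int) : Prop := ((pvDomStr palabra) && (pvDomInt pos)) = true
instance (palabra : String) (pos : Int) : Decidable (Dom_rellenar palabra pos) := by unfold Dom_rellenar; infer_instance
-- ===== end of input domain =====

-- B replaces A's one-character-per-call recursion by a single closed-form pad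
-- (modular indexing into the salt cycle); objective: simpler.

-- ===== PORT A =====
-- salt=["A","b","C","d","E"] : a Python list of 1-character strings → List (List Char)
def pvSaltA : List (List Char) := [['A'], ['b'], ['C'], ['d'], ['E']]

-- every element of salt has length 1 (used only for termination of the port)
theorem pvSaltA_len : ∀ c ∈ pvSaltA, c.length = 1 := by decide

-- literal transliteration of A's recursion, on the code-point list
def rellenarChars (p : List Char) (pos : Int) : List Char :=
  let pos1 : Int := if pos = 5 then 0 else pos          -- if pos == len(salt): pos = 0
  if _h : p.length < 32 then
    match _hm : PySem.List.pyGet? pvSaltA pos1 with     -- salt[pos] (none = IndexError, outside Pre_)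
    | some c => rellenarChars (p ++ c) (pos1 + 1)       -- pal = palabra + salt[pos]; pos = pos + 1; recurse
    | none => p
  else p
termination_by 32 - p.length
decreasing_by
  have := pvSaltA_len _ (PySem.List.mem_of_pyGet?_eq_some _ _hm)
  simp [List.length_append, this]; omega

def rellenar (palabra : String) (pos : Int) : String :=
  String.ofList (rellenarChars palabra.toList pos)

-- ===== PORT B =====
-- transliteration of Source B: n = 32 - len(palabra); if n <= 0 return palabra;
-- else append salt[(pos+k) % 5] for k in range(n).  (pos+k) % 5 is always a
-- valid index into the 5-character salt, so the pyGetD default is never used.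
def rellenar_alt (palabra : String) (pos : Int) : String :=
  let salt : List Char := ['A', 'b', 'C', 'd', 'E']     -- "AbCdE"
  let n : Int := 32 - PySem.Chars.len palabra.toList
  if n ≤ 0 then palabra
  else String.ofList (palabra.toList ++
    (PySem.List.pyRange 0 n 1).map
      (fun k => PySem.List.pyGetD salt (PySem.Int.mod (pos + k) 5) 'A'))

-- ===== PRECONDITION & SPEC =====
-- Pre_ excludes exactly the inputs on which A raises IndexError:
-- a word shorter than 32 characters together with pos < -5 or pos > 5.
def Pre_rellenar (palabra : String) (pos : Int) : Prop :=
  32 ≤ palabra.toList.length ∨ (-5 ≤ pos ∧ pos ≤ 5)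
instance (palabra : String) (pos : Int) : Decidable (Pre_rellenar palabra pos) := by
  unfold Pre_rellenar; infer_instance

def pvWitness_rellenar : String × Int := ("hola", 2)

def Spec_rellenar (palabra : String) (pos : Int) (out : String) : Prop := out = rellenar_alt palabra pos
instance (palabra : String) (pos : Int) (out : String) : Decidable (Spec_rellenar palabra pos out) := by unfold Spec_rellenar; infer_instance

-- ===== CLAIM (what is proved, stated in full; the proofs are below) =====
def Claim_equal_rellenar : Prop := ∀ (palabra : String) (pos : Int), Dom_rellenar palabra pos → Pre_rellenar palabra pos → Spec_rellenar palabra pos (rellenar palabra pos)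

-- ===== LEMMAS AND PROOFS =====

-- the pad A's recursion appends, as a function of the number n of missing characters
def pvPadA : Nat → Int → List Char
  | 0, _ => []
  | n + 1, pos =>
    let pos1 : Int := if pos = 5 then 0 else pos
    match PySem.List.pyGet? pvSaltA pos1 with
    | some c => c ++ pvPadA n (pos1 + 1)
    | none => []

-- the pad B's closed form appends
def pvPadB (n : Nat) (pos : Int) : List Char :=
  (PySem.List.pyRange 0 (n : Int) 1).map
    (fun k => PySem.List.pyGetD ['A', 'b', 'C', 'd', 'E'] (PySem.Int.mod (pos + k) 5) 'A')

theorem rellenarChars_eq_pad :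
    ∀ (n : Nat) (p : List Char) (pos : Int), 32 - p.length = n →
      rellenarChars p pos = p ++ pvPadA n pos := by
  intro n
  induction n with
  | zero =>
    intro p pos h
    rw [rellenarChars.eq_def]
    have : ¬ p.length < 32 := by omega
    simp [this, pvPadA]
  | succ n ih =>
    intro p pos h
    have hlt : p.length < 32 := by omega
    rw [rellenarChars.eq_def]
    simp only [hlt, dif_pos]
    cases hm : PySem.List.pyGet? pvSaltA (if pos = 5 then 0 else pos) with
    | none =>
      show p = p ++ pvPadA (n + 1) pos
      simp [pvPadA, hm]
    | some c =>
      have hc : c.length = 1 := pvSaltA_len _ (PySem.List.mem_of_pyGet?_eq_some _ hm)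
      have hlen : 32 - (p ++ c).length = n := by
        simp [List.length_append, hc]; omega
      show rellenarChars (p ++ c) ((if pos = 5 then 0 else pos) + 1) = p ++ pvPadA (n + 1) pos
      rw [ih (p ++ c) _ hlen]
      simp [pvPadA, hm]

theorem pad_eq_fin : ∀ (n : Fin 33) (q : Fin 11),
    pvPadA n.val ((q.val : Int) - 5) = pvPadB n.val ((q.val : Int) - 5) := by decide

theorem pad_eq (n : Nat) (pos : Int) (hn : n ≤ 32) (h1 : -5 ≤ pos) (h2 : pos ≤ 5) :
    pvPadA n pos = pvPadB n pos := by
  have hq : (pos + 5).toNat < 11 := by omega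
  have h := pad_eq_fin ⟨n, by omega⟩ ⟨(pos + 5).toNat, hq⟩
  have e1 : ((⟨n, by omega⟩ : Fin 33) : Nat) = n := rfl
  have e2 : (((⟨(pos + 5).toNat, hq⟩ : Fin 11) : Nat) : Int) - 5 = pos := by
    show (((pos + 5).toNat : Nat) : Int) - 5 = pos
    omega
  rw [e1, e2] at h
  exact h

-- ===== VERDICT (by name: the statement is the Claim_ definition above) =====
theorem rellenar_spec : Claim_equal_rellenar := by
  unfold Claim_equal_rellenar
  intro palabra pos _hDom hPre
  unfold Spec_rellenar rellenar rellenar_alt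
  have hcl : PySem.Chars.len palabra.toList = (palabra.toList.length : Int) :=
    PySem.Chars.len_eq _
  by_cases hlen : 32 ≤ palabra.toList.length
  · -- word already long enough: both return palabra
    rw [rellenarChars.eq_def]
    have h1 : ¬ palabra.toList.length < 32 := by omega
    have h2 : 32 - PySem.Chars.len palabra.toList ≤ 0 := by omega
    simp only [h1, dite_false, h2, if_pos]
    exact String.ofList_toList
  · rcases hPre with h32 | ⟨h1, h2⟩
    · omega
    · have hA := rellenarChars_eq_pad (32 - palabra.toList.length) palabra.toList pos rfl
      rw [hA, pad_eq _ _ (by omega) h1 h2]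
      have hn : ¬ (32 - PySem.Chars.len palabra.toList ≤ 0) := by omega
      rw [if_neg hn]
      unfold pvPadB
      have hcast : ((32 - palabra.toList.length : Nat) : Int)
           = 32 - PySem.Chars.len palabra.toList := by omega
      rw [hcast]
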